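-- pv_equiv track=rewrite | github.com/Theiby/AI-Game-Playing | AI Game.py | find_sandwiches
-- ===== SOURCE A (Python) =====
-- EMPTY = '.'
--
-- def find_sandwiches(board, our_piece, opp_piece):
--
--     reward = 0
--     penalty = 0
--     size = len(board)
--
--     for r in range(size):
--         row = board[r]
--         start_idx = 0
--         while start_idx < size:
--             if row[start_idx] == EMPTY:
--                 start_idx += 1
--                 continue
--
--             piece_type = row[start_idx]
--             end_idx = start_idx
--
--             while end_idx + 1 < size and row[end_idx + 1] == piece_type:
--                 end_idx += 1
--
--             seg_len = end_idx - start_idx + 1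
--             seg_left = start_idx - 1
--             seg_right = end_idx + 1
--             left_piece = row[seg_left] if seg_left >= 0 else None
--             right_piece = row[seg_right] if seg_right < size else None
--
--             if piece_type == our_piece:
--                 if left_piece == opp_piece and right_piece == opp_piece:
--                     penalty += seg_len * 80
--             elif piece_type == opp_piece:
--                 if left_piece == our_piece and right_piece == our_piece:
--                     reward += seg_len * 80
--
--             start_idx = end_idx + 1
--
--
--     for c in range(size):
--         col = [board[r][c] for r in range(size)]
--         start_idx = 0
--         while start_idx < size:
--             if col[start_idx] == EMPTY:
--                 start_idx += 1
--                 continue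
--
--             piece_type = col[start_idx]
--             end_idx = start_idx
--             while end_idx + 1 < size and col[end_idx + 1] == piece_type:
--                 end_idx += 1
--
--             seg_len = end_idx - start_idx + 1
--             seg_top = start_idx - 1
--             seg_bottom = end_idx + 1
--             top_piece = col[seg_top] if seg_top >= 0 else None
--             bottom_piece = col[seg_bottom] if seg_bottom < size else None
--
--             if piece_type == our_piece:
--                 if top_piece == opp_piece and bottom_piece == opp_piece:
--                     penalty += seg_len * 80
--             elif piece_type == opp_piece:
--                 if top_piece == our_piece and bottom_piece == our_piece:
--                     reward += seg_len * 80
--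
--             start_idx = end_idx + 1
--
--     return reward, penalty
-- ===== SOURCE B (Python) =====
-- EMPTY = '.'
--
-- def _runs(line):
--     # run-length encode the line: list of (value, length)
--     runs = []
--     for ch in line:
--         if runs and runs[-1][0] == ch:
--             runs[-1] = (ch, runs[-1][1] + 1)
--         else:
--             runs.append((ch, 1))
--     return runs
--
-- def _score_line(line, our_piece, opp_piece):
--     reward = 0
--     penalty = 0
--     runs = _runs(line)
--     prev = None
--     for i, (v, n) in enumerate(runs):
--         nxt = runs[i + 1][0] if i + 1 < len(runs) else None
--         if v != EMPTY:
--             if v == our_piece and prev == opp_piece and nxt == opp_piece: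
--                 penalty += n * 80
--             elif v == opp_piece and prev == our_piece and nxt == our_piece:
--                 reward += n * 80
--         prev = v
--     return reward, penalty
--
-- def find_sandwiches(board, our_piece, opp_piece):
--     size = len(board)
--     lines = [row[:size] for row in board]
--     lines += [''.join(row[c] for row in lines) for c in range(size)]
--     reward = 0
--     penalty = 0
--     for line in lines:
--         r, p = _score_line(line, our_piece, opp_piece)
--         reward += r
--         penalty += p
--     return reward, penalty
-- ===== Notes on version B (the rewrite author's own statement) =====
-- stated objective: alternative
-- what changed: A's index-arithmetic while-loops (inner while extending end_idx, neighbor cells fetched by bounds-checked indexing) are replaced by run-length encoding each row/column once and scoring each non-empty run against the previous and next run's values; B is a genuinely different decomposition of the same O(n^2) work.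
import Mathlib
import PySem

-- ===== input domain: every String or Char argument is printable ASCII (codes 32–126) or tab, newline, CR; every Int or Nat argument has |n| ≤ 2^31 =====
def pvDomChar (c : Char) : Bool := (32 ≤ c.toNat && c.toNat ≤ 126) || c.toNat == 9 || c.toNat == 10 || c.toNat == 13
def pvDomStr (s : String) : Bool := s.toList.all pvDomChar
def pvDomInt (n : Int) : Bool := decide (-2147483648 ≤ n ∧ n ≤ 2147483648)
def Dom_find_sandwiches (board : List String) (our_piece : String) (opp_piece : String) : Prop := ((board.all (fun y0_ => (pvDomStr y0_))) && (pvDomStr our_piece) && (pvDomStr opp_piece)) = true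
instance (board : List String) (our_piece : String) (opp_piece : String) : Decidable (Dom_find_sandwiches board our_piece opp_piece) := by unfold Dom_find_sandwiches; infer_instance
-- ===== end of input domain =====

-- B replaces A's index-arithmetic while-scans by a run-length encoding of each line scored
-- with a previous/next-run look (objective: alternative decomposition, same asymptotic cost).
-- Indexing in both ports uses List.getD; under Pre_ every access is in range, as in the Pythons.

-- `cell == piece` / `neighbor == piece` in Python compares a 1-char string (or None) with a string.
def pvOptEq (o : Option Char) (s : String) : Bool :=
  match o with
  | some c => decide (String.mk [c] = s)
  | none => false

-- ===== PORT A =====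
-- inner while: extend end_idx while row[end_idx+1] == piece_type
def pvRunEnd (row : List Char) (size : Nat) (pt : Char) (e : Nat) : Nat :=
  if h : e + 1 < size ∧ row.getD (e + 1) '.' = pt then pvRunEnd row size pt (e + 1) else e
termination_by size - e
decreasing_by omega

theorem pvRunEnd_ge (row : List Char) (size : Nat) (pt : Char) (e : Nat) :
    e ≤ pvRunEnd row size pt e := by
  unfold pvRunEnd
  split
  · exact le_trans (by omega) (pvRunEnd_ge row size pt (e + 1))
  · exact le_refl e
termination_by size - e
decreasing_by omega

-- outer while over start_idx (one line of the board)
def pvScanA (row : List Char) (size : Nat) (our opp : String) (start : Nat) (acc : Int × Int) :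
    Int × Int :=
  if h : start < size then
    let c := row.getD start '.'
    if c = '.' then
      pvScanA row size our opp (start + 1) acc
    else
      let e := pvRunEnd row size c start
      let segLen : Int := (e : Int) - (start : Int) + 1
      let left : Option Char := if 1 ≤ start then some (row.getD (start - 1) '.') else none
      let right : Option Char := if e + 1 < size then some (row.getD (e + 1) '.') else none
      let acc' : Int × Int :=
        if String.mk [c] = our then
          if pvOptEq left opp = true ∧ pvOptEq right opp = true then
            (acc.1, acc.2 + segLen * 80)
          else acc
        else if String.mk [c] = opp then
          if pvOptEq left our = true ∧ pvOptEq right our = true then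
            (acc.1 + segLen * 80, acc.2)
          else acc
        else acc
      pvScanA row size our opp (e + 1) acc'
  else acc
termination_by size - start
decreasing_by
  · omega
  · have := pvRunEnd_ge row size (row.getD start '.') start
    omega

def find_sandwiches (board : List String) (our_piece : String) (opp_piece : String) : Int × Int :=
  let size := board.length
  let acc1 := (List.range size).foldl
    (fun acc r => pvScanA (board.getD r "").toList size our_piece opp_piece 0 acc) (0, 0)
  (List.range size).foldl
    (fun acc c =>
      pvScanA ((List.range size).map (fun r => (board.getD r "").toList.getD c '.'))
        size our_piece opp_piece 0 acc) acc1

-- ===== PORT B =====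
-- run-length encoding: runs.append / runs[-1] = (ch, n+1)
def pvRunsStep (runs : List (Char × Nat)) (ch : Char) : List (Char × Nat) :=
  match runs.getLast? with
  | some (c, n) => if c = ch then runs.dropLast ++ [(ch, n + 1)] else runs ++ [(ch, 1)]
  | none => [(ch, 1)]

def pvRuns (line : List Char) : List (Char × Nat) := line.foldl pvRunsStep []

-- the enumerate loop over runs, prev carried, nxt looked ahead
def pvScoreRuns (our opp : String) (prev : Option Char) (acc : Int × Int) :
    List (Char × Nat) → Int × Int
  | [] => acc
  | (v, n) :: rest =>
    let nxt : Option Char := match rest with | [] => none | (w, _) :: _ => some w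
    let acc' : Int × Int :=
      if v ≠ '.' then
        if String.mk [v] = our ∧ pvOptEq prev opp = true ∧ pvOptEq nxt opp = true then
          (acc.1, acc.2 + (n : Int) * 80)
        else if String.mk [v] = opp ∧ pvOptEq prev our = true ∧ pvOptEq nxt our = true then
          (acc.1 + (n : Int) * 80, acc.2)
        else acc
      else acc
    pvScoreRuns our opp (some v) acc' rest

def find_sandwiches_alt (board : List String) (our_piece : String) (opp_piece : String) :
    Int × Int :=
  let size := board.length
  let rows := board.map (fun row => row.toList.take size)
  let lines := rows ++ (List.range size).map (fun c => rows.map (fun row => row.getD c '.'))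
  lines.foldl
    (fun acc line =>
      let s := pvScoreRuns our_piece opp_piece none (0, 0) (pvRuns line)
      (acc.1 + s.1, acc.2 + s.2)) (0, 0)

-- ===== PRECONDITION & SPEC =====
-- Pre_ excludes exactly the boards on which A raises IndexError: a row shorter than the
-- number of rows (A indexes every row, and every column, at positions 0..len(board)-1).
def Pre_find_sandwiches (board : List String) (our_piece : String) (opp_piece : String) : Prop :=
  ∀ s ∈ board, board.length ≤ s.toList.length
instance (board : List String) (our_piece : String) (opp_piece : String) :
    Decidable (Pre_find_sandwiches board our_piece opp_piece) := by
  unfold Pre_find_sandwiches; infer_instance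

def pvWitness_find_sandwiches : List String × String × String := ([], "", "")

def Spec_find_sandwiches (board : List String) (our_piece : String) (opp_piece : String)
    (out : Int × Int) : Prop := out = find_sandwiches_alt board our_piece opp_piece
instance (board : List String) (our_piece : String) (opp_piece : String) (out : Int × Int) :
    Decidable (Spec_find_sandwiches board our_piece opp_piece out) := by
  unfold Spec_find_sandwiches; infer_instance

-- ===== CLAIM (what is proved, stated in full; the proofs are below) =====
def Claim_equal_find_sandwiches : Prop := ∀ (board : List String) (our_piece : String) (opp_piece : String), Dom_find_sandwiches board our_piece opp_piece → Pre_find_sandwiches board our_piece opp_piece → Spec_find_sandwiches board our_piece opp_piece (find_sandwiches board our_piece opp_piece)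

-- ===== LEMMAS AND PROOFS =====

-- length of the leading run of c, and the line after it
def pvRunLen (c : Char) : List Char → Nat
  | [] => 0
  | x :: t => if x = c then pvRunLen c t + 1 else 0

def pvDropRun (c : Char) : List Char → List Char
  | [] => []
  | x :: t => if x = c then pvDropRun c t else x :: t

theorem pvDropRun_length_le (c : Char) (l : List Char) : (pvDropRun c l).length ≤ l.length := by
  induction l with
  | nil => simp [pvDropRun]
  | cons x t ih => by_cases h : x = c <;> simp [pvDropRun, h] <;> omega

theorem pvDropRun_eq_drop (c : Char) (l : List Char) : pvDropRun c l = l.drop (pvRunLen c l) := by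
  induction l with
  | nil => rfl
  | cons x t ih => by_cases h : x = c <;> simp [pvDropRun, pvRunLen, h, ih]

theorem pvRunLen_getElem? (c : Char) (l : List Char) (k : Nat) (h : k < pvRunLen c l) :
    l[k]? = some c := by
  induction l generalizing k with
  | nil => simp [pvRunLen] at h
  | cons x t ih =>
    by_cases hx : x = c
    · cases k with
      | zero => simp [hx]
      | succ k =>
        simp only [pvRunLen, if_pos hx] at h
        simpa using ih k (by omega)
    · simp [pvRunLen, hx] at h

-- one segment's contribution (A's nested ifs and B's flat ifs both compute this)
def pvScoreOne (our opp : String) (prev nxt : Option Char) (c : Char) (len : Nat) : Int × Int :=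
  if String.mk [c] = our ∧ pvOptEq prev opp = true ∧ pvOptEq nxt opp = true then
    (0, (len : Int) * 80)
  else if String.mk [c] = opp ∧ pvOptEq prev our = true ∧ pvOptEq nxt our = true then
    ((len : Int) * 80, 0)
  else (0, 0)

-- the per-line score, structurally: skip '.' cells, consume maximal runs otherwise
def pvS (our opp : String) (prev : Option Char) : List Char → Int × Int
  | [] => (0, 0)
  | c :: t =>
    if c = '.' then pvS our opp (some '.') t
    else
      let rest := pvDropRun c t
      let sc := pvScoreOne our opp prev rest.head? c (pvRunLen c t + 1)
      let s := pvS our opp (some c) rest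
      (sc.1 + s.1, sc.2 + s.2)
termination_by l => l.length
decreasing_by
  · simp
  · have := pvDropRun_length_le c t; simp; omega

def pvPrev (l : List Char) (start : Nat) : Option Char :=
  if start = 0 then none else some (l.getD (start - 1) '.')

theorem pvGetD_lt (l : List Char) (i : Nat) (h : i < l.length) : l.getD i '.' = l[i] := by
  simp [List.getD_eq_getElem?_getD, List.getElem?_eq_getElem h]

theorem pvRunEnd_eq (l : List Char) (c : Char) (e : Nat) :
    pvRunEnd l l.length c e = e + pvRunLen c (l.drop (e + 1)) := by
  unfold pvRunEnd
  split
  · rename_i h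
    obtain ⟨h1, h2⟩ := h
    rw [pvRunEnd_eq l c (e + 1), List.drop_eq_getElem_cons h1]
    rw [pvGetD_lt l (e + 1) h1] at h2
    simp [pvRunLen, h2]
    omega
  · rename_i h
    by_cases h1 : e + 1 < l.length
    · have h2 : l[e + 1] ≠ c := by
        intro hc
        exact h ⟨h1, by rw [pvGetD_lt l (e + 1) h1]; exact hc⟩
      rw [List.drop_eq_getElem_cons h1]
      simp [pvRunLen, h2]
    · rw [List.drop_eq_nil_of_le (by omega)]
      simp [pvRunLen]
termination_by l.length - e
decreasing_by omega

theorem pvAccUpdate_eq (our opp : String) (acc : Int × Int) (left right : Option Char)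
    (c : Char) (m : Nat) :
    (if String.mk [c] = our then
        if pvOptEq left opp = true ∧ pvOptEq right opp = true then
          (acc.1, acc.2 + ((m : Int)) * 80)
        else acc
      else if String.mk [c] = opp then
        if pvOptEq left our = true ∧ pvOptEq right our = true then
          (acc.1 + ((m : Int)) * 80, acc.2)
        else acc
      else acc)
    = (acc.1 + (pvScoreOne our opp left right c m).1,
       acc.2 + (pvScoreOne our opp left right c m).2) := by
  unfold pvScoreOne
  split_ifs <;> simp_all

theorem pvScanA_eq (our opp : String) (l : List Char) (start : Nat) (acc : Int × Int) :
    pvScanA l l.length our opp start acc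
      = (acc.1 + (pvS our opp (pvPrev l start) (l.drop start)).1,
         acc.2 + (pvS our opp (pvPrev l start) (l.drop start)).2) := by
  unfold pvScanA
  split
  · rename_i hlt
    set c := l.getD start '.' with hc
    have hcel : l[start] = c := (pvGetD_lt l start hlt).symm
    rw [List.drop_eq_getElem_cons hlt, hcel]
    by_cases hdot : c = '.'
    · rw [if_pos hdot]
      rw [pvScanA_eq our opp l (start + 1) acc]
      have hprev : pvPrev l (start + 1) = some '.' := by
        unfold pvPrev
        rw [if_neg (Nat.succ_ne_zero start), Nat.add_sub_cancel, ← hc, hdot]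
      rw [hprev, hdot]
      simp [pvS]
    · rw [if_neg hdot]
      set m := pvRunLen c (l.drop (start + 1)) with hm
      have he : pvRunEnd l l.length c start = start + m := pvRunEnd_eq l c start
      rw [pvScanA_eq our opp l (pvRunEnd l l.length c start + 1) _]
      rw [he]
      have hseg : (((start + m : Nat) : Int) - (start : Int) + 1) = ((m + 1 : Nat) : Int) := by
        push_cast; ring
      have hleft : (if 1 ≤ start then some (l.getD (start - 1) '.') else none)
          = pvPrev l start := by
        unfold pvPrev; by_cases h0 : start = 0 <;> simp [h0]
      have hrest : pvDropRun c (l.drop (start + 1)) = l.drop (start + m + 1) := by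
        rw [pvDropRun_eq_drop, ← hm, List.drop_drop]
        congr 1; omega
      have hright : (if start + m + 1 < l.length then some (l.getD (start + m + 1) '.') else none)
          = (l.drop (start + m + 1)).head? := by
        rw [List.head?_drop]
        by_cases hin : start + m + 1 < l.length
        · rw [if_pos hin, pvGetD_lt l _ hin, List.getElem?_eq_getElem hin]
        · rw [if_neg hin, List.getElem?_eq_none_iff.mpr (by omega)]
      have hprev' : pvPrev l (start + m + 1) = some c := by
        unfold pvPrev
        have hgc : l.getD (start + m) '.' = c := by
          rcases Nat.eq_zero_or_pos m with h0 | h0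
          · rw [h0, Nat.add_zero, ← hc]
          · have hk : (l.drop (start + 1))[m - 1]? = some c :=
              pvRunLen_getElem? c (l.drop (start + 1)) (m - 1) (by omega)
            rw [List.getElem?_drop] at hk
            have heq : start + 1 + (m - 1) = start + m := by omega
            rw [heq] at hk
            obtain ⟨hlt2, hval⟩ := List.getElem?_eq_some_iff.mp hk
            rw [pvGetD_lt l _ hlt2, hval]
        rw [if_neg (by omega), Nat.add_sub_cancel]
        exact congrArg some hgc
      rw [hseg, hleft, hprev']
      rw [pvAccUpdate_eq our opp acc _ _ c (m + 1)]
      have hS : pvS our opp (pvPrev l start) (c :: l.drop (start + 1))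
          = ((pvScoreOne our opp (pvPrev l start) (l.drop (start + m + 1)).head? c (m + 1)).1
              + (pvS our opp (some c) (l.drop (start + m + 1))).1,
             (pvScoreOne our opp (pvPrev l start) (l.drop (start + m + 1)).head? c (m + 1)).2
              + (pvS our opp (some c) (l.drop (start + m + 1))).2) := by
        rw [pvS]
        rw [if_neg hdot, hrest, ← hm]
      rw [hS]
      rw [← hright]
      simp only [Prod.mk.injEq]
      constructor <;> ring
  · rename_i hge
    rw [List.drop_eq_nil_of_le (by omega)]
    simp [pvS]
termination_by l.length - start
decreasing_by
  · omega
  · have := pvRunEnd_ge l l.length (l.getD start '.') start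
    omega

def pvCrRuns : List Char → List (Char × Nat)
  | [] => []
  | c :: t => (c, pvRunLen c t + 1) :: pvCrRuns (pvDropRun c t)
termination_by l => l.length
decreasing_by have := pvDropRun_length_le c t; simp; omega

theorem pvFoldl_pvRunsStep (l : List Char) :
    ∀ (init : List (Char × Nat)) (c : Char) (n : Nat),
      l.foldl pvRunsStep (init ++ [(c, n + 1)])
        = init ++ (c, n + 1 + pvRunLen c l) :: pvCrRuns (pvDropRun c l) := by
  induction l with
  | nil => intro init c n; simp [pvRunLen, pvDropRun, pvCrRuns]
  | cons x t ih =>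
    intro init c n
    rw [List.foldl_cons]
    have hstep : pvRunsStep (init ++ [(c, n + 1)]) x
        = if c = x then init ++ [(x, n + 2)] else (init ++ [(c, n + 1)]) ++ [(x, 1)] := by
      unfold pvRunsStep
      rw [List.getLast?_concat]
      dsimp only
      by_cases hx : c = x
      · rw [if_pos hx, if_pos hx, List.dropLast_concat]
      · rw [if_neg hx, if_neg hx]
    rw [hstep]
    by_cases hx : c = x
    · rw [if_pos hx]
      subst hx
      rw [show n + 2 = (n + 1) + 1 from rfl, ih init c (n + 1)]
      have h1 : pvRunLen c (c :: t) = pvRunLen c t + 1 := by simp [pvRunLen]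
      have h2 : pvDropRun c (c :: t) = pvDropRun c t := by simp [pvDropRun]
      rw [h1, h2]
      congr 3
      omega
    · rw [if_neg hx]
      have := ih (init ++ [(c, n + 1)]) x 0
      rw [this]
      have hxc : ¬ x = c := fun h => hx h.symm
      have h1 : pvRunLen c (x :: t) = 0 := by simp [pvRunLen, hxc]
      have h2 : pvDropRun c (x :: t) = x :: t := by simp [pvDropRun, hxc]
      rw [h1, h2]
      have h3 : pvCrRuns (x :: t) = (x, pvRunLen x t + 1) :: pvCrRuns (pvDropRun x t) := by
        rw [pvCrRuns]
      rw [h3, List.append_assoc]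
      simp
      omega

theorem pvRuns_eq_crRuns (l : List Char) : pvRuns l = pvCrRuns l := by
  cases l with
  | nil => simp [pvRuns, pvCrRuns]
  | cons x t =>
    unfold pvRuns
    rw [List.foldl_cons]
    have h0 : pvRunsStep [] x = [] ++ [(x, 0 + 1)] := by rfl
    rw [h0, pvFoldl_pvRunsStep t [] x 0, pvCrRuns]
    simp
    omega

theorem pvS_dot_skip (our opp : String) (t : List Char) :
    pvS our opp (some '.') (pvDropRun '.' t) = pvS our opp (some '.') t := by
  induction t with
  | nil => rfl
  | cons x s ih =>
    by_cases hx : x = '.'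
    · rw [show pvDropRun '.' (x :: s) = pvDropRun '.' s by simp [pvDropRun, hx], ih]
      rw [show pvS our opp (some '.') (x :: s) = pvS our opp (some '.') s by
        rw [pvS, if_pos hx]]
    · rw [show pvDropRun '.' (x :: s) = x :: s by simp [pvDropRun, hx]]

theorem pvScoreRuns_eq (our opp : String) (l : List Char) (prev : Option Char) (acc : Int × Int) :
    pvScoreRuns our opp prev acc (pvCrRuns l)
      = (acc.1 + (pvS our opp prev l).1, acc.2 + (pvS our opp prev l).2) := by
  cases l with
  | nil => simp [pvCrRuns, pvScoreRuns, pvS]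
  | cons c t =>
    rw [pvCrRuns]
    simp only [pvScoreRuns]
    have hnxt : (match pvCrRuns (pvDropRun c t) with
        | [] => (none : Option Char) | (w, _) :: _ => some w) = (pvDropRun c t).head? := by
      cases h : pvDropRun c t with
      | nil => rw [pvCrRuns]; simp
      | cons y s => rw [pvCrRuns]; rfl
    by_cases hdot : c = '.'
    · rw [if_neg (by simp [hdot])]
      rw [pvScoreRuns_eq our opp (pvDropRun c t) (some c) acc]
      rw [show pvS our opp prev (c :: t) = pvS our opp (some '.') t by rw [pvS, if_pos hdot]]
      rw [hdot, pvS_dot_skip]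
    · rw [if_pos (by simp [hdot])]
      rw [pvScoreRuns_eq our opp (pvDropRun c t) (some c) _]
      rw [show pvS our opp prev (c :: t)
          = ((pvScoreOne our opp prev (pvDropRun c t).head? c (pvRunLen c t + 1)).1
              + (pvS our opp (some c) (pvDropRun c t)).1,
             (pvScoreOne our opp prev (pvDropRun c t).head? c (pvRunLen c t + 1)).2
              + (pvS our opp (some c) (pvDropRun c t)).2) by rw [pvS, if_neg hdot]]
      rw [hnxt]
      unfold pvScoreOne
      split_ifs <;> simp <;> ring
termination_by l.length
decreasing_by
  · have := pvDropRun_length_le c t; simp; omega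
  · have := pvDropRun_length_le c t; simp; omega

theorem pvLine_eq (our opp : String) (l : List Char) (acc : Int × Int) :
    pvScanA l l.length our opp 0 acc
      = (acc.1 + (pvScoreRuns our opp none (0, 0) (pvRuns l)).1,
         acc.2 + (pvScoreRuns our opp none (0, 0) (pvRuns l)).2) := by
  rw [pvScanA_eq our opp l 0 acc, pvRuns_eq_crRuns, pvScoreRuns_eq our opp l none (0, 0)]
  simp [pvPrev]

theorem pvRunEnd_take (l : List Char) (size : Nat) (h : size ≤ l.length) (c : Char) (e : Nat) :
    pvRunEnd (l.take size) size c e = pvRunEnd l size c e := by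
  have hg : ∀ i, i < size → (l.take size).getD i '.' = l.getD i '.' := by
    intro i hi
    simp [List.getD_eq_getElem?_getD, hi]
  unfold pvRunEnd
  by_cases h2 : e + 1 < size ∧ l.getD (e + 1) '.' = c
  · rw [dif_pos h2, dif_pos ⟨h2.1, by rw [hg (e + 1) h2.1]; exact h2.2⟩]
    exact pvRunEnd_take l size h c (e + 1)
  · have h2' : ¬ (e + 1 < size ∧ (l.take size).getD (e + 1) '.' = c) := by
      intro hh
      exact h2 ⟨hh.1, by rw [← hg (e + 1) hh.1]; exact hh.2⟩
    rw [dif_neg h2', dif_neg h2]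
termination_by size - e
decreasing_by omega

theorem pvScanA_take (our opp : String) (l : List Char) (size : Nat) (h : size ≤ l.length)
    (start : Nat) (acc : Int × Int) :
    pvScanA (l.take size) size our opp start acc = pvScanA l size our opp start acc := by
  have hg : ∀ i, i < size → (l.take size).getD i '.' = l.getD i '.' := by
    intro i hi
    simp [List.getD_eq_getElem?_getD, hi]
  unfold pvScanA
  by_cases h1 : start < size
  · rw [dif_pos h1, dif_pos h1, hg start h1]
    by_cases hdot : l.getD start '.' = '.'
    · rw [if_pos hdot, if_pos hdot]
      exact pvScanA_take our opp l size h (start + 1) acc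
    · rw [if_neg hdot, if_neg hdot]
      rw [pvRunEnd_take l size h (l.getD start '.') start]
      by_cases hr : pvRunEnd l size (l.getD start '.') start + 1 < size
      · simp only [hg (start - 1) (by omega), hg _ hr]
        exact pvScanA_take our opp l size h (pvRunEnd l size (l.getD start '.') start + 1) _
      · simp only [hg (start - 1) (by omega), if_neg hr]
        exact pvScanA_take our opp l size h (pvRunEnd l size (l.getD start '.') start + 1) _
  · rw [dif_neg h1, dif_neg h1]
termination_by size - start
decreasing_by
  all_goals have := pvRunEnd_ge l size (l.getD start '.') start
  all_goals omega

theorem pvFoldl_range_getD {α β : Type} (l : List α) (d : α) (f : β → α → β) (init : β) :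
    (List.range l.length).foldl (fun acc r => f acc (l.getD r d)) init = l.foldl f init := by
  induction l using List.reverseRecOn generalizing init with
  | nil => simp
  | append_singleton l a ih =>
    have hlen : (l ++ [a]).length = l.length + 1 := by simp
    rw [hlen, List.range_succ, List.foldl_append, List.foldl_append]
    simp only [List.foldl_cons, List.foldl_nil]
    have hcongr : (List.range l.length).foldl (fun acc r => f acc ((l ++ [a]).getD r d)) init
        = (List.range l.length).foldl (fun acc r => f acc (l.getD r d)) init := by
      apply PySem.List.foldl_congr_mem
      intro acc r hr
      have hrlt : r < l.length := List.mem_range.mp hr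
      have : (l ++ [a]).getD r d = l.getD r d := by
        simp [List.getD_eq_getElem?_getD, List.getElem?_append_left hrlt]
      rw [this]
    rw [hcongr, ih]
    have hlast : (l ++ [a]).getD l.length d = a := by
      simp [List.getD_eq_getElem?_getD]
    rw [hlast]

-- ===== VERDICT (by name: the statement is the Claim_ definition above) =====
theorem find_sandwiches_spec : Claim_equal_find_sandwiches := by
  intro board our opp _hdom hpre
  unfold Spec_find_sandwiches find_sandwiches find_sandwiches_alt
  dsimp only
  set size := board.length with hsz
  set rows := board.map (fun row => row.toList.take size) with hrows
  have hF : ∀ (acc : Int × Int) (row : String), row ∈ board →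
      pvScanA row.toList size our opp 0 acc
        = pvScanA (row.toList.take size) size our opp 0 acc := by
    intro acc row hrow
    exact (pvScanA_take our opp row.toList size (hpre row hrow) 0 acc).symm
  have hG : ∀ (acc : Int × Int) (line : List Char), line.length = size →
      pvScanA line size our opp 0 acc
        = (acc.1 + (pvScoreRuns our opp none (0, 0) (pvRuns line)).1,
           acc.2 + (pvScoreRuns our opp none (0, 0) (pvRuns line)).2) := by
    intro acc line hl
    rw [← hl]
    exact pvLine_eq our opp line acc
  have h1 : (List.range size).foldl
        (fun acc r => pvScanA (board.getD r "").toList size our opp 0 acc) ((0 : Int), (0 : Int))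
      = board.foldl (fun acc row => pvScanA row.toList size our opp 0 acc) (0, 0) :=
    pvFoldl_range_getD board "" (fun acc row => pvScanA row.toList size our opp 0 acc) (0, 0)
  have h2 : board.foldl (fun acc row => pvScanA row.toList size our opp 0 acc) ((0 : Int), (0 : Int))
      = rows.foldl (fun acc line =>
          let s := pvScoreRuns our opp none (0, 0) (pvRuns line)
          (acc.1 + s.1, acc.2 + s.2)) (0, 0) := by
    rw [hrows, List.foldl_map]
    apply PySem.List.foldl_congr_mem
    intro acc row hrow
    have hlen : (row.toList.take size).length = size := by
      have hpl := hpre row hrow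
      simp only [List.length_take]
      omega
    rw [hF acc row hrow, hG acc _ hlen]
  have hcol : ∀ c, c ∈ List.range size →
      (List.range size).map (fun r => (board.getD r "").toList.getD c '.')
        = rows.map (fun row => row.getD c '.') := by
    intro c hc
    have hcs : c < size := List.mem_range.mp hc
    apply List.ext_getElem
    · simp [hrows, hsz]
    · intro i h1i h2i
      have hi : i < size := by simpa using h1i
      have hib : i < board.length := hi
      simp only [List.getElem_map, List.getElem_range, hrows]
      have hbi : board.getD i "" = board[i] := by
        simp [List.getD_eq_getElem?_getD, List.getElem?_eq_getElem hib]
      rw [hbi]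
      simp [List.getD_eq_getElem?_getD, hcs]
  have h3 : ∀ (X : Int × Int), (List.range size).foldl
        (fun acc c => pvScanA ((List.range size).map (fun r => (board.getD r "").toList.getD c '.'))
          size our opp 0 acc) X
      = ((List.range size).map (fun c => rows.map (fun row => row.getD c '.'))).foldl
          (fun acc line =>
            let s := pvScoreRuns our opp none (0, 0) (pvRuns line)
            (acc.1 + s.1, acc.2 + s.2)) X := by
    intro X
    rw [List.foldl_map]
    apply PySem.List.foldl_congr_mem
    intro acc c hc
    rw [hcol c hc]
    have hlen : (rows.map (fun row => row.getD c '.')).length = size := by simp [hrows, hsz]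
    rw [hG acc _ hlen]
  rw [List.foldl_append, h1, h2, h3]
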